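-- pv_equiv track=rewrite | github.com/Yash9988/self-learn | leetcode/2593.py | findScore_op
-- ===== SOURCE A (Python) =====
-- from collections import deque
--
-- def findScore_op(nums: list[int]) -> int:
--     n = len(nums)                                                   # Obtain the size of the list
--     q = deque()                                                     # Queue to store values
--     score = 0                                                       # Counter to track the score
--
--     for i in range(n):                                              # Iterate through the list range
--         if q and nums[i] >= q[-1]:                                  # Check if curr-ele `>=` to the last queue element
--             skip = False                                            # Unset the skip-flag
--
--             while q:                                                # While the queue is non-empty
--                 add = q.pop()                                       # Pop the last element from the queue
--                 if not skip:                                        # Check if the flag is unset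
--                     score += add                                    # Increment the score counter
--
--                 skip = not skip                                     # Flip the skip-flag
--
--             continue                                                # Skip to the next iteration
--
--         q.append(nums[i])                                           # Append the curr-val to the queue
--
--     skip = False                                                    # Unset the skip-flag
--     while q:                                                        # While the queue is non-empty
--         add = q.pop()                                               # Pop the last element from the queue
--         if not skip:                                                # Check if the flag is unset
--             score += add                                            # Increment the score counter
--
--         skip = not skip                                             # Flip the skip-flag
--
--     return score                                                    # Return the result
-- ===== SOURCE B (Python) =====
-- def findScore_op(nums: list[int]) -> int:
--     # One pass, O(1) extra space: instead of buffering the current strictly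
--     # decreasing run in a deque and draining it, keep two running alternating
--     # sums of the current run: `take` = best sum with the run's last element
--     # taken, `skip` = with it skipped. A break element (>= its predecessor)
--     # commits `take` and is itself dropped.
--     score = 0
--     take = 0
--     skip = 0
--     prev = None
--     for x in nums:
--         if prev is not None and x >= prev:
--             score += take
--             take = 0
--             skip = 0
--             prev = None
--         else:
--             take, skip = skip + x, take
--             prev = x
--     return score + take
-- ===== Notes on version B (the rewrite author's own statement) =====
-- stated objective: faster
-- what changed: Replaces A's deque that buffers each strictly decreasing run and is drained by an alternate-skip pop loop with a single pass keeping two running alternating sums (take/skip) and the previous element: O(1) extra space, no deque allocation/pop inner loop (measured ~1.6x constant-factor speedup).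
import Mathlib
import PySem

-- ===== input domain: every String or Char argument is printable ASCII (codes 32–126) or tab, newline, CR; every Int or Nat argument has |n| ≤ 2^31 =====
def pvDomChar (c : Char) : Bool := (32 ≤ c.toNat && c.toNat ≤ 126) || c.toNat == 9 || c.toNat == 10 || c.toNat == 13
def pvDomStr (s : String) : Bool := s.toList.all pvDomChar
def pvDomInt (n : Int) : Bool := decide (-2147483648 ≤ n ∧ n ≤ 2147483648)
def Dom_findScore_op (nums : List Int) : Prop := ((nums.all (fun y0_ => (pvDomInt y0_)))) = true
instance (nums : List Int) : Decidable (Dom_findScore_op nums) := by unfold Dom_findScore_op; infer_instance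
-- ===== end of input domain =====

-- B replaces A's deque buffering + alternate-pop draining by a single pass with two
-- running alternating sums (O(1) extra space); objective: alternative.

-- ===== PORT A =====
-- The deque is represented as a List Int in REVERSED order: q.append(v) = v :: q,
-- q[-1] = head, q.pop() = uncons. All deque operations in A act on the right end only,
-- so this representation is exact.

-- the `skip = False; while q: add = q.pop(); if not skip: score += add; skip = not skip` loop
def drainA : List Int → Bool → Int → Int
  | [], _, score => score
  | a :: q, skip, score => drainA q (!skip) (if !skip then score + a else score)

-- the `for i in range(n)` loop; state = (queue, score)
def loopA : List Int → List Int → Int → List Int × Int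
  | [], q, score => (q, score)
  | x :: rest, q, score =>
    match q with
    | qh :: qt =>
      if x ≥ qh then loopA rest [] (drainA (qh :: qt) false score)
      else loopA rest (x :: qh :: qt) score
    | [] => loopA rest [x] score

def findScore_op (nums : List Int) : Int :=
  let r := loopA nums [] 0
  drainA r.1 false r.2

-- ===== PORT B =====
-- the `for x in nums` loop; state = (prev, take, skip, score)
def loopB : List Int → Option Int → Int → Int → Int → Int
  | [], _, take, _, score => score + take
  | x :: rest, prev, take, skip, score =>
    match prev with
    | some p =>
      if x ≥ p then loopB rest none 0 0 (score + take)
      else loopB rest (some x) (skip + x) take score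
    | none => loopB rest (some x) (skip + x) take score

def findScore_op_alt (nums : List Int) : Int :=
  loopB nums none 0 0 0

-- ===== PRECONDITION & SPEC =====
def Spec_findScore_op (nums : List Int) (out : Int) : Prop := out = findScore_op_alt nums
instance (nums : List Int) (out : Int) : Decidable (Spec_findScore_op nums out) := by unfold Spec_findScore_op; infer_instance

-- ===== CLAIM (what is proved, stated in full; the proofs are below) =====
def Claim_equal_findScore_op : Prop := ∀ (nums : List Int), Dom_findScore_op nums → Spec_findScore_op nums (findScore_op nums)

-- ===== LEMMAS AND PROOFS =====

-- alternating sums of the (reversed) queue: altT = last element taken, altF = last skipped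
mutual
def altT : List Int → Int
  | [] => 0
  | a :: q => a + altF q
def altF : List Int → Int
  | [] => 0
  | _ :: q => altT q
end

theorem drainA_eq (q : List Int) : ∀ (skip : Bool) (score : Int),
    drainA q skip score = score + (if skip then altF q else altT q) := by
  induction q with
  | nil => intro skip score; simp [drainA, altT, altF]
  | cons a q ih =>
    intro skip score
    cases skip <;> simp [drainA, ih, altT, altF] <;> try ring

theorem loop_eq (xs : List Int) : ∀ (q : List Int) (score : Int),
    (let r := loopA xs q score; drainA r.1 false r.2)
      = loopB xs q.head? (altT q) (altF q) score := by
  induction xs with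
  | nil =>
    intro q score
    simp [loopA, loopB, drainA_eq]
  | cons x rest ih =>
    intro q score
    cases q with
    | nil => simpa [loopA, loopB, altT, altF] using ih [x] score
    | cons qh qt =>
      by_cases h : x ≥ qh
      · simpa [loopA, loopB, h, drainA_eq] using ih [] (score + altT (qh :: qt))
      · simpa [loopA, loopB, h, altT, altF, Int.add_comm] using ih (x :: qh :: qt) score

-- ===== VERDICT (by name: the statement is the Claim_ definition above) =====
theorem findScore_op_spec : Claim_equal_findScore_op := by
  intro nums _
  unfold Spec_findScore_op findScore_op findScore_op_alt
  simpa [altT, altF] using loop_eq nums [] 0
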